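-- pv_equiv track=rewrite | github.com/areebahasnain/AI_Spring25 | Labs/03/Q3.py | iterative_deepening_dfs
-- ===== SOURCE A (Python) =====
-- def iterative_deepening_dfs(graph, start, goal, max_depth):
--     def dls(node, depth, visited):
--         if depth == 0:
--             return node == goal
--         if node not in visited:
--             visited.add(node)
--             for neighbor, _ in graph.get(node, []):
--                 if dls(neighbor, depth - 1, visited):
--                     return True
--             visited.remove(node)
--         return False
--
--     for depth in range(max_depth + 1):
--         if dls(start, depth, set()):
--             return True
--     return False
-- ===== SOURCE B (Python) =====
-- def iterative_deepening_dfs(graph, start, goal, max_depth):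
--     # Single BFS over edge-distance levels instead of iterative deepening:
--     # goal is reachable within max_depth iff its BFS level is <= max_depth.
--     if max_depth < 0:
--         return False
--     frontier = [start]
--     visited = {start}
--     d = 0
--     while frontier and d <= max_depth:
--         if goal in frontier:
--             return True
--         nxt = []
--         for u in frontier:
--             for v, _ in graph.get(u, []):
--                 if v not in visited:
--                     visited.add(v)
--                     nxt.append(v)
--         frontier = nxt
--         d += 1
--     return False
-- ===== Notes on version B (the rewrite author's own statement) =====
-- stated objective: faster
-- what changed: Replaced iterative-deepening DFS (restart a depth-limited recursive search for every depth 0..max_depth) with a single breadth-first search that expands one distance level per step and succeeds iff the goal appears within max_depth levels.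
import Mathlib
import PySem

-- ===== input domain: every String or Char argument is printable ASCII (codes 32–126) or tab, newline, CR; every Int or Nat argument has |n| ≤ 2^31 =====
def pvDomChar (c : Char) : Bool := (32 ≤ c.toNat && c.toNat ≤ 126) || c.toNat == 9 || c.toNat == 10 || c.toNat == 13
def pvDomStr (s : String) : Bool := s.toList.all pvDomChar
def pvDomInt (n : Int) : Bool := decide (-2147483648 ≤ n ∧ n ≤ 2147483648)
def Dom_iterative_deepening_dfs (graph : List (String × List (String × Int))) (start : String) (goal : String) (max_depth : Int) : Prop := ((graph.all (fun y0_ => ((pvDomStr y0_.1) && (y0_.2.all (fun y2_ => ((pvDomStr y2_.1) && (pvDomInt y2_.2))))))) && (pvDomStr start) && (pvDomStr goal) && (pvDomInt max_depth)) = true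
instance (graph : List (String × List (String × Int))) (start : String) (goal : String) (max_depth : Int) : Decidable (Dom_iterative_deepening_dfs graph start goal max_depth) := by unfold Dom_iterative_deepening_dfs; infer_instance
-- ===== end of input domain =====

-- B replaces A's iterative-deepening DFS by a single level-by-level BFS; return values proved equal on all inputs.

-- graph.get(node, []) on the association list (dict, unique keys: first match)
def pvAdjGet (graph : List (String × List (String × Int))) (node : String) : List (String × Int) :=
  ((graph.find? (fun p => p.1 == node)).map Prod.snd).getD []

-- ===== PORT A =====
-- inner def dls(node, depth, visited); depth comes from range(max_depth + 1) so it is a Nat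
def pvDlsA (graph : List (String × List (String × Int))) (goal : String) :
    String → Nat → PySem.Set String → Bool
  | node, 0, _ => node == goal
  | node, d+1, visited =>
    if PySem.Set.contains visited node then false
    else (pvAdjGet graph node).any (fun nb => pvDlsA graph goal nb.1 d (PySem.Set.add visited node))

def iterative_deepening_dfs (graph : List (String × List (String × Int))) (start : String) (goal : String) (max_depth : Int) : Bool :=
  -- for depth in range(max_depth + 1): if dls(start, depth, set()): return True / return False
  (PySem.List.pyRange 0 (max_depth + 1) 1).any
    (fun depth => pvDlsA graph goal start depth.toNat PySem.Set.empty)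

-- ===== PORT B =====
-- body of the nested for-loops: expand the frontier one BFS level, skipping visited nodes
def pvExpandB (graph : List (String × List (String × Int)))
    (acc : List String × PySem.Set String) (u : String) : List String × PySem.Set String :=
  (pvAdjGet graph u).foldl
    (fun acc2 vp =>
      if vp.1 ∈ acc2.2 then acc2 else (acc2.1 ++ [vp.1], PySem.Set.add acc2.2 vp.1)) acc

-- while frontier and d <= max_depth: …
def pvBfsB (graph : List (String × List (String × Int))) (goal : String) (max_depth : Int) :
    List String → PySem.Set String → Int → Bool
  | frontier, visited, d =>
    if frontier = [] then false
    else if h : max_depth < d then false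
    else if frontier.contains goal then true
    else
      let st := frontier.foldl (pvExpandB graph) ([], visited)
      pvBfsB graph goal max_depth st.1 st.2 (d + 1)
termination_by _ _ d => (max_depth + 1 - d).toNat
decreasing_by omega

def iterative_deepening_dfs_alt (graph : List (String × List (String × Int))) (start : String) (goal : String) (max_depth : Int) : Bool :=
  if max_depth < 0 then false
  else pvBfsB graph goal max_depth [start] (PySem.Set.add PySem.Set.empty start) 0

-- ===== PRECONDITION & SPEC =====
def Spec_iterative_deepening_dfs (graph : List (String × List (String × Int))) (start : String) (goal : String) (max_depth : Int) (out : Bool) : Prop := out = iterative_deepening_dfs_alt graph start goal max_depth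
instance (graph : List (String × List (String × Int))) (start : String) (goal : String) (max_depth : Int) (out : Bool) : Decidable (Spec_iterative_deepening_dfs graph start goal max_depth out) := by unfold Spec_iterative_deepening_dfs; infer_instance

-- ===== CLAIM (what is proved, stated in full; the proofs are below) =====
def Claim_equal_iterative_deepening_dfs : Prop := ∀ (graph : List (String × List (String × Int))) (start : String) (goal : String) (max_depth : Int), Dom_iterative_deepening_dfs graph start goal max_depth → Spec_iterative_deepening_dfs graph start goal max_depth (iterative_deepening_dfs graph start goal max_depth)

-- ===== LEMMAS AND PROOFS =====

-- neighbours of u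
def pvAdj (graph : List (String × List (String × Int))) (u : String) : List String :=
  (pvAdjGet graph u).map Prod.fst

-- there is a walk of length exactly k from u to v
def pvWalk (graph : List (String × List (String × Int))) : String → Nat → String → Prop
  | u, 0, v => v = u
  | u, k+1, v => ∃ w, w ∈ pvAdj graph u ∧ pvWalk graph w k v

-- cumulative BFS reach: v reachable from start in at most n steps
def pvCR (graph : List (String × List (String × Int))) (start : String) : Nat → String → Prop
  | 0, v => v = start
  | n+1, v => pvCR graph start n v ∨ ∃ u, pvCR graph start n u ∧ v ∈ pvAdj graph u

theorem pvWalk_snoc {graph : List (String × List (String × Int))} {u w x : String} {k : Nat}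
    (h : pvWalk graph u k w) (hx : x ∈ pvAdj graph w) : pvWalk graph u (k+1) x := by
  induction k generalizing u with
  | zero => subst h; exact ⟨x, hx, rfl⟩
  | succ k ih =>
    obtain ⟨w', hw', hwalk⟩ := h
    exact ⟨w', hw', ih hwalk⟩

theorem pvWalk_succ_iff {graph : List (String × List (String × Int))} {u v : String} {k : Nat} :
    pvWalk graph u (k+1) v ↔ ∃ w, pvWalk graph u k w ∧ v ∈ pvAdj graph w := by
  induction k generalizing u with
  | zero =>
    constructor
    · rintro ⟨w, hw, rfl⟩; exact ⟨u, rfl, hw⟩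
    · rintro ⟨w, rfl, hv⟩; exact ⟨v, hv, rfl⟩
  | succ k ih =>
    constructor
    · rintro ⟨w, hw, hwalk⟩
      obtain ⟨z, hz, hv⟩ := ih.mp hwalk
      exact ⟨z, ⟨w, hw, hz⟩, hv⟩
    · rintro ⟨z, ⟨w, hw, hz⟩, hv⟩
      exact ⟨w, hw, ih.mpr ⟨z, hz, hv⟩⟩

theorem pvCR_iff_walk {graph : List (String × List (String × Int))} {start : String} :
    ∀ n v, pvCR graph start n v ↔ ∃ k ≤ n, pvWalk graph start k v := by
  intro n
  induction n with
  | zero =>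
    intro v
    constructor
    · intro h; exact ⟨0, le_refl 0, h⟩
    · rintro ⟨k, hk, hw⟩
      interval_cases k
      exact hw
  | succ n ih =>
    intro v
    constructor
    · rintro (h | ⟨u, hu, hv⟩)
      · obtain ⟨k, hk, hw⟩ := (ih v).mp h
        exact ⟨k, Nat.le_succ_of_le hk, hw⟩
      · obtain ⟨k, hk, hw⟩ := (ih u).mp hu
        exact ⟨k+1, Nat.succ_le_succ hk, pvWalk_snoc hw hv⟩
    · rintro ⟨k, hk, hw⟩
      rcases Nat.lt_or_ge k (n+1) with h | h
      · exact Or.inl ((ih v).mpr ⟨k, Nat.lt_succ_iff.mp h, hw⟩)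
      · have : k = n + 1 := le_antisymm hk h
        subst this
        obtain ⟨w, hw', hv⟩ := pvWalk_succ_iff.mp hw
        exact Or.inr ⟨w, (ih w).mpr ⟨n, le_refl n, hw'⟩, hv⟩

theorem pvCR_mono {graph : List (String × List (String × Int))} {start : String} {n m : Nat}
    (h : n ≤ m) {v : String} (hv : pvCR graph start n v) : pvCR graph start m v := by
  obtain ⟨k, hk, hw⟩ := (pvCR_iff_walk n v).mp hv
  exact (pvCR_iff_walk m v).mpr ⟨k, le_trans hk h, hw⟩

theorem pvCR_stab {graph : List (String × List (String × Int))} {start : String} {m : Nat}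
    (h : ∀ x, pvCR graph start (m+1) x → pvCR graph start m x) :
    ∀ j x, pvCR graph start (m+j) x → pvCR graph start m x := by
  intro j
  induction j with
  | zero => intro x hx; exact hx
  | succ j ih =>
    intro x hx
    rcases hx with hx | ⟨u, hu, hxadj⟩
    · exact ih x hx
    · exact h x (Or.inr ⟨u, ih u hu, hxadj⟩)

-- ===== A-side: dls characterisation =====

theorem pvDlsA_sound {graph : List (String × List (String × Int))} {goal : String} :
    ∀ (d : Nat) (node : String) (visited : PySem.Set String),
      pvDlsA graph goal node d visited = true → pvWalk graph node d goal := by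
  intro d
  induction d with
  | zero =>
    intro node visited h
    simp [pvDlsA] at h
    exact h.symm
  | succ d ih =>
    intro node visited h
    simp only [pvDlsA] at h
    split at h
    · exact absurd h (by simp)
    · obtain ⟨nb, hnb, hrec⟩ := List.any_eq_true.mp h
      exact ⟨nb.1, List.mem_map_of_mem hnb, ih nb.1 _ hrec⟩

-- walks as lists of nodes
def pvWalkL (graph : List (String × List (String × Int))) (l : List String) : Prop :=
  List.IsChain (fun a b => b ∈ pvAdj graph a) l

theorem pvWalk_iff_list {graph : List (String × List (String × Int))} :
    ∀ (k : Nat) (u v : String),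
      pvWalk graph u k v ↔ ∃ l, pvWalkL graph l ∧ l.length = k + 1 ∧ l.head? = some u ∧ l.getLast? = some v := by
  intro k
  induction k with
  | zero =>
    intro u v
    constructor
    · intro h; subst h
      exact ⟨[_], List.isChain_singleton _, rfl, rfl, rfl⟩
    · rintro ⟨l, _, hlen, hh, hl⟩
      match l, hlen with
      | [x], _ =>
        simp at hh hl
        subst hh; subst hl; rfl
  | succ k ih =>
    intro u v
    constructor
    · rintro ⟨w, hw, hwalk⟩
      obtain ⟨l, hl, hlen, hh, hlast⟩ := (ih w v).mp hwalk
      refine ⟨u :: l, ?_, by simp [hlen], rfl, ?_⟩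
      · exact List.isChain_cons.mpr ⟨fun y hy => by rw [hh] at hy; simp at hy; subst hy; exact hw, hl⟩
      · rw [List.getLast?_cons, hlast]
        cases l with
        | nil => simp at hlen
        | cons a as => simp
    · rintro ⟨l, hl, hlen, hh, hlast⟩
      match l, hlen with
      | x :: y :: t, hlen =>
        simp at hh
        have hchain := List.isChain_cons_cons.mp hl
        refine ⟨y, by rw [← hh]; exact hchain.1, (ih y v).mpr ⟨y :: t, hchain.2, by simpa using hlen, rfl, ?_⟩⟩
        rwa [List.getLast?_cons_cons] at hlast

-- a duplicate gives a decomposition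
theorem pvDup_split {α : Type} [DecidableEq α] :
    ∀ (l : List α), ¬ l.Nodup → ∃ (p : List α) (a : α) (q r : List α), l = p ++ a :: q ++ a :: r := by
  intro l
  induction l with
  | nil => intro h; exact absurd List.nodup_nil h
  | cons x t ih =>
    intro h
    by_cases hx : x ∈ t
    · obtain ⟨s, t', rfl⟩ := List.append_of_mem hx
      exact ⟨[], x, s, t', rfl⟩
    · have ht : ¬ t.Nodup := by
        intro hnd
        exact h (List.nodup_cons.mpr ⟨hx, hnd⟩)
      obtain ⟨p, a, q, r, rfl⟩ := ih ht
      exact ⟨x :: p, a, q, r, rfl⟩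

-- splice out a cycle
theorem pvSplice {graph : List (String × List (String × Int))} {l : List String}
    (hl : pvWalkL graph l) (hnd : ¬ l.Nodup) :
    ∃ l', pvWalkL graph l' ∧ l'.length < l.length ∧ l'.head? = l.head? ∧ l'.getLast? = l.getLast? := by
  obtain ⟨p, a, q, r, rfl⟩ := pvDup_split l hnd
  refine ⟨p ++ a :: r, ?_, by simp, ?_, ?_⟩
  · unfold pvWalkL at *
    have hl' : List.IsChain (fun a b => b ∈ pvAdj graph a) (p ++ ((a :: q) ++ (a :: r))) := by
      simpa using hl
    rw [List.isChain_append] at hl'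
    obtain ⟨hp, hqr, hlink⟩ := hl'
    rw [List.isChain_append] at hqr
    rw [List.isChain_append]
    refine ⟨hp, hqr.2.1, fun x hx y hy => hlink x hx y ?_⟩
    simp only [List.head?_cons, List.cons_append, Option.mem_def, Option.some.injEq] at hy ⊢
    exact hy
  · cases p <;> simp
  · have h1 : (p ++ a :: r : List String).getLast? = (a :: r : List String).getLast? :=
      List.getLast?_append_of_ne_nil _ (List.cons_ne_nil a r)
    have h2 : ((p ++ a :: q) ++ a :: r : List String).getLast? = (a :: r : List String).getLast? :=
      List.getLast?_append_of_ne_nil _ (List.cons_ne_nil a r)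
    rw [h1]
    exact h2.symm

theorem pvMinWalkL {graph : List (String × List (String × Int))} :
    ∀ (n : Nat) (l : List String), l.length ≤ n → pvWalkL graph l →
      ∃ l', pvWalkL graph l' ∧ l'.Nodup ∧ l'.length ≤ l.length ∧ l'.head? = l.head? ∧ l'.getLast? = l.getLast? := by
  intro n
  induction n with
  | zero =>
    intro l hlen hl
    have : l = [] := List.length_eq_zero_iff.mp (Nat.le_zero.mp hlen)
    subst this
    exact ⟨[], hl, List.nodup_nil, le_refl _, rfl, rfl⟩
  | succ n ih =>
    intro l hlen hl
    by_cases hnd : l.Nodup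
    · exact ⟨l, hl, hnd, le_refl _, rfl, rfl⟩
    · obtain ⟨l', hl', hlt, hh, hlast⟩ := pvSplice hl hnd
      obtain ⟨l'', h1, h2, h3, h4, h5⟩ := ih l' (by omega) hl'
      exact ⟨l'', h1, h2, by omega, h4.trans hh, h5.trans hlast⟩

theorem pvDlsA_complete {graph : List (String × List (String × Int))} {goal : String} :
    ∀ (l : List String) (visited : PySem.Set String) (u : String),
      pvWalkL graph l → l.dropLast.Nodup → (∀ x ∈ l.dropLast, x ∉ visited) →
      l.getLast? = some goal → l.head? = some u →
      pvDlsA graph goal u (l.length - 1) visited = true := by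
  intro l
  induction l with
  | nil => intro visited u _ _ _ _ hh; simp at hh
  | cons a t ih =>
    intro visited u hchain hnd hvis hlast hh
    simp at hh
    subst hh
    cases t with
    | nil =>
      simp at hlast
      simp [pvDlsA, hlast]
    | cons b t' =>
      have hlen : (a :: b :: t' : List String).length - 1 = (b :: t').length - 1 + 1 := by simp
      rw [hlen]
      have hdrop : (a :: b :: t' : List String).dropLast = a :: (b :: t').dropLast := by
        simp [List.dropLast_cons_of_ne_nil]
      rw [hdrop] at hnd hvis
      have havis : a ∉ visited := hvis a List.mem_cons_self
      simp only [pvDlsA]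
      rw [if_neg (by simpa [PySem.Set.contains_iff] using havis)]
      apply List.any_eq_true.mpr
      have hchain' := List.isChain_cons_cons.mp hchain
      obtain ⟨vp, hvp, hvp1⟩ := List.mem_map.mp hchain'.1
      refine ⟨vp, hvp, ?_⟩
      rw [hvp1]
      apply ih (PySem.Set.add visited a) b hchain'.2 (List.nodup_cons.mp hnd).2
      · intro x hx
        rw [PySem.Set.mem_add]
        push_neg
        refine ⟨hvis x (List.mem_cons_of_mem _ hx), ?_⟩
        intro hxe; subst hxe
        exact (List.nodup_cons.mp hnd).1 hx
      · rwa [List.getLast?_cons_cons] at hlast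
      · rfl

theorem pvA_iff {graph : List (String × List (String × Int))} {start goal : String} {max_depth : Int} :
    iterative_deepening_dfs graph start goal max_depth = true ↔
      ∃ k : Nat, (k : Int) ≤ max_depth ∧ pvWalk graph start k goal := by
  unfold iterative_deepening_dfs
  rw [List.any_eq_true]
  constructor
  · rintro ⟨d, hd, hdls⟩
    rw [PySem.List.mem_pyRange_one] at hd
    refine ⟨d.toNat, by omega, pvDlsA_sound _ _ _ hdls⟩
  · rintro ⟨k, hk, hwalk⟩
    obtain ⟨l, hl, hlen, hh, hlast⟩ := (pvWalk_iff_list k start goal).mp hwalk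
    obtain ⟨l', hl', hnd', hlen', hh', hlast'⟩ := pvMinWalkL l.length l (le_refl _) hl
    have hne : l' ≠ [] := by
      intro h
      rw [h] at hh'
      rw [hh] at hh'
      simp at hh'
    have hpos : 1 ≤ l'.length := List.length_pos_iff.mpr hne
    refine ⟨(l'.length : Int) - 1, ?_, ?_⟩
    · rw [PySem.List.mem_pyRange_one]
      have : l'.length ≤ k + 1 := by omega
      constructor
      · omega
      · omega
    · rw [show ((l'.length : Int) - 1).toNat = l'.length - 1 by omega]
      apply pvDlsA_complete l' PySem.Set.empty start hl'
        (hnd'.sublist (List.dropLast_sublist l'))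
        (by intro x _ hx; simp [PySem.Set.empty] at hx)
        (hlast'.trans hlast) (hh'.trans hh)

-- ===== B-side: BFS invariant =====

theorem pvExpandB_mem (graph : List (String × List (String × Int))) (u : String) :
    ∀ (es : List (String × Int)) (nf : List String) (vis : PySem.Set String),
      (∀ x, x ∈ (es.foldl (fun acc2 vp => if vp.1 ∈ acc2.2 then acc2 else (acc2.1 ++ [vp.1], PySem.Set.add acc2.2 vp.1)) (nf, vis)).2
        ↔ x ∈ vis ∨ ∃ e ∈ es, x = e.1) ∧
      (∀ x, x ∈ (es.foldl (fun acc2 vp => if vp.1 ∈ acc2.2 then acc2 else (acc2.1 ++ [vp.1], PySem.Set.add acc2.2 vp.1)) (nf, vis)).1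
        ↔ x ∈ nf ∨ (x ∉ vis ∧ ∃ e ∈ es, x = e.1)) := by
  intro es
  induction es with
  | nil => intro nf vis; constructor <;> intro x <;> simp
  | cons e es ih =>
    intro nf vis
    simp only [List.foldl_cons]
    by_cases he : e.1 ∈ vis
    · rw [if_pos he]
      obtain ⟨ih2, ih1⟩ := ih nf vis
      constructor
      · intro x
        rw [ih2 x]
        constructor
        · rintro (h | h)
          · exact Or.inl h
          · exact Or.inr (by obtain ⟨e', he', hx⟩ := h; exact ⟨e', List.mem_cons_of_mem _ he', hx⟩)
        · rintro (h | ⟨e', he', hx⟩)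
          · exact Or.inl h
          · rcases List.mem_cons.mp he' with rfl | he''
            · exact Or.inl (hx ▸ he)
            · exact Or.inr ⟨e', he'', hx⟩
      · intro x
        rw [ih1 x]
        constructor
        · rintro (h | ⟨hnv, e', he', hx⟩)
          · exact Or.inl h
          · exact Or.inr ⟨hnv, e', List.mem_cons_of_mem _ he', hx⟩
        · rintro (h | ⟨hnv, e', he', hx⟩)
          · exact Or.inl h
          · rcases List.mem_cons.mp he' with rfl | he''
            · exact absurd (hx ▸ he) hnv
            · exact Or.inr ⟨hnv, e', he'', hx⟩
    · rw [if_neg he]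
      obtain ⟨ih2, ih1⟩ := ih (nf ++ [e.1]) (PySem.Set.add vis e.1)
      constructor
      · intro x
        rw [ih2 x, PySem.Set.mem_add]
        constructor
        · rintro ((h | rfl) | ⟨e', he', hx⟩)
          · exact Or.inl h
          · exact Or.inr ⟨e, List.mem_cons_self, rfl⟩
          · exact Or.inr ⟨e', List.mem_cons_of_mem _ he', hx⟩
        · rintro (h | ⟨e', he', hx⟩)
          · exact Or.inl (Or.inl h)
          · rcases List.mem_cons.mp he' with rfl | he''
            · exact Or.inl (Or.inr hx)
            · exact Or.inr ⟨e', he'', hx⟩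
      · intro x
        rw [ih1 x, PySem.Set.mem_add, List.mem_append]
        constructor
        · rintro ((h | hx) | ⟨hnv, e', he', hx⟩)
          · exact Or.inl h
          · have hxe : x = e.1 := by simpa using hx
            exact Or.inr ⟨fun hv => he (hxe ▸ hv), e, List.mem_cons_self, hxe⟩
          · exact Or.inr ⟨fun hv => hnv (Or.inl hv), e', List.mem_cons_of_mem _ he', hx⟩
        · rintro (h | ⟨hnv, e', he', hx⟩)
          · exact Or.inl (Or.inl h)
          · rcases List.mem_cons.mp he' with rfl | he''
            · exact Or.inl (Or.inr (by simpa using hx))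
            · by_cases hxe : x = e.1
              · exact Or.inl (Or.inr (by simpa using hxe))
              · exact Or.inr ⟨fun h' => (by rcases h' with h' | h'; exact hnv h'; exact hxe h'), e', he'', hx⟩

theorem pvExpand_mem (graph : List (String × List (String × Int))) :
    ∀ (fr : List String) (nf : List String) (vis : PySem.Set String),
      (∀ x, x ∈ (fr.foldl (pvExpandB graph) (nf, vis)).2 ↔ x ∈ vis ∨ ∃ u ∈ fr, x ∈ pvAdj graph u) ∧
      (∀ x, x ∈ (fr.foldl (pvExpandB graph) (nf, vis)).1 ↔ x ∈ nf ∨ (x ∉ vis ∧ ∃ u ∈ fr, x ∈ pvAdj graph u)) := by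
  intro fr
  induction fr with
  | nil => intro nf vis; constructor <;> intro x <;> simp
  | cons u fr ih =>
    intro nf vis
    simp only [List.foldl_cons]
    have hstep := pvExpandB_mem graph u (pvAdjGet graph u) nf vis
    have hmemadj : ∀ x, (∃ e ∈ pvAdjGet graph u, x = e.1) ↔ x ∈ pvAdj graph u := by
      intro x
      simp [pvAdj, List.mem_map, eq_comm]
    have hpe : pvExpandB graph (nf, vis) u =
        (pvAdjGet graph u).foldl (fun acc2 vp => if vp.1 ∈ acc2.2 then acc2 else (acc2.1 ++ [vp.1], PySem.Set.add acc2.2 vp.1)) (nf, vis) := rfl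
    obtain ⟨ihr2, ihr1⟩ := ih (pvExpandB graph (nf, vis) u).1 (pvExpandB graph (nf, vis) u).2
    constructor
    · intro x
      rw [show (List.foldl (pvExpandB graph) (pvExpandB graph (nf, vis) u) fr) =
            (List.foldl (pvExpandB graph) ((pvExpandB graph (nf, vis) u).1, (pvExpandB graph (nf, vis) u).2) fr) by rfl]
      rw [ihr2 x]
      rw [hpe, (hstep.1 x), hmemadj x]
      constructor
      · rintro ((h | h) | ⟨u', hu', hx⟩)
        · exact Or.inl h
        · exact Or.inr ⟨u, List.mem_cons_self, h⟩
        · exact Or.inr ⟨u', List.mem_cons_of_mem _ hu', hx⟩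
      · rintro (h | ⟨u', hu', hx⟩)
        · exact Or.inl (Or.inl h)
        · rcases List.mem_cons.mp hu' with rfl | hu''
          · exact Or.inl (Or.inr hx)
          · exact Or.inr ⟨u', hu'', hx⟩
    · intro x
      rw [show (List.foldl (pvExpandB graph) (pvExpandB graph (nf, vis) u) fr) =
            (List.foldl (pvExpandB graph) ((pvExpandB graph (nf, vis) u).1, (pvExpandB graph (nf, vis) u).2) fr) by rfl]
      rw [ihr1 x]
      rw [hpe, (hstep.2 x), (hstep.1 x), hmemadj x]
      constructor
      · rintro ((h | ⟨hnv, hx⟩) | ⟨hnv2, u', hu', hx⟩)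
        · exact Or.inl h
        · exact Or.inr ⟨hnv, u, List.mem_cons_self, hx⟩
        · exact Or.inr ⟨fun hv => hnv2 (Or.inl hv), u', List.mem_cons_of_mem _ hu', hx⟩
      · rintro (h | ⟨hnv, u', hu', hx⟩)
        · exact Or.inl (Or.inl h)
        · rcases List.mem_cons.mp hu' with rfl | hu''
          · exact Or.inl (Or.inr ⟨hnv, hx⟩)
          · by_cases hadj : x ∈ pvAdj graph u
            · exact Or.inl (Or.inr ⟨hnv, hadj⟩)
            · exact Or.inr ⟨fun h' => (by rcases h' with h' | h'; exact hnv h'; exact hadj h'), u', hu'', hx⟩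

theorem pvBfs_correct {graph : List (String × List (String × Int))} {start goal : String} {max_depth : Int} :
    ∀ (fuel : Nat) (n : Nat) (frontier : List String) (visited : PySem.Set String),
      (max_depth + 1 - (n : Int)).toNat ≤ fuel →
      (∀ x, x ∈ visited ↔ pvCR graph start n x) →
      (∀ x, x ∈ frontier ↔ (pvCR graph start n x ∧ ∀ m < n, ¬ pvCR graph start m x)) →
      (∀ m < n, ¬ pvCR graph start m goal) →
      (pvBfsB graph goal max_depth frontier visited (n : Int) = true ↔
        ∃ k : Nat, (k : Int) ≤ max_depth ∧ pvCR graph start k goal) := by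
  intro fuel
  induction fuel with
  | zero =>
    intro n frontier visited hfuel H1 H2 H3
    have hlt : max_depth < (n : Int) := by omega
    rw [pvBfsB]
    rw [dif_pos hlt]
    simp only [ite_self]
    constructor
    · intro h; exact absurd h (by simp)
    · rintro ⟨k, hk, hcr⟩
      exact absurd hcr (H3 k (by omega))
  | succ fuel ih =>
    intro n frontier visited hfuel H1 H2 H3
    rw [pvBfsB]
    by_cases hfr : frontier = []
    · rw [if_pos hfr]
      constructor
      · intro h; exact absurd h (by simp)
      · rintro ⟨k, hk, hcr⟩
        -- the frontier is empty: reachability has stabilised below n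
        cases n with
        | zero =>
          have := (H2 start).mpr ⟨rfl, fun m hm => absurd hm (Nat.not_lt_zero m)⟩
          rw [hfr] at this
          simp at this
        | succ m =>
          have hstab1 : ∀ x, pvCR graph start (m+1) x → pvCR graph start m x := by
            intro x hx
            by_cases hall : ∀ j < m + 1, ¬ pvCR graph start j x
            · have := (H2 x).mpr ⟨hx, hall⟩
              rw [hfr] at this
              simp at this
            · push_neg at hall
              obtain ⟨j, hj, hcr'⟩ := hall
              exact pvCR_mono (by omega) hcr'
          rcases Nat.lt_or_ge k (m+1) with h | h
          · exact absurd hcr (H3 k h)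
          · have hm : pvCR graph start m goal :=
              pvCR_stab hstab1 (k - m) goal (by rw [show m + (k - m) = k by omega]; exact hcr)
            exact absurd hm (H3 m (by omega))
    · rw [if_neg hfr]
      by_cases hd : max_depth < (n : Int)
      · rw [dif_pos hd]
        constructor
        · intro h; exact absurd h (by simp)
        · rintro ⟨k, hk, hcr⟩
          exact absurd hcr (H3 k (by omega))
      · rw [dif_neg hd]
        by_cases hg : frontier.contains goal
        · rw [if_pos hg]
          have hmem : goal ∈ frontier := by simpa using hg
          exact ⟨fun _ => ⟨n, by omega, ((H2 goal).mp hmem).1⟩, fun _ => rfl⟩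
        · rw [if_neg hg]
          simp only []
          have hgoal_n : ¬ pvCR graph start n goal := by
            intro hcr
            exact hg (by simpa using (H2 goal).mpr ⟨hcr, H3⟩)
          have H3' : ∀ m < n + 1, ¬ pvCR graph start m goal := by
            intro m hm
            rcases Nat.lt_or_ge m n with h | h
            · exact H3 m h
            · have : m = n := by omega
              subst this
              exact hgoal_n
          obtain ⟨he2, he1⟩ := pvExpand_mem graph frontier [] visited
          -- the successor-level characterisation of pvCR
          have hCRsucc : ∀ x, pvCR graph start (n+1) x ↔
              pvCR graph start n x ∨ ∃ u ∈ frontier, x ∈ pvAdj graph u := by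
            intro x
            constructor
            · rintro (h | ⟨u, hu, hx⟩)
              · exact Or.inl h
              · by_cases hlev : ∀ m < n, ¬ pvCR graph start m u
                · exact Or.inr ⟨u, (H2 u).mpr ⟨hu, hlev⟩, hx⟩
                · push_neg at hlev
                  obtain ⟨m, hm, hcr'⟩ := hlev
                  cases n with
                  | zero => omega
                  | succ n' =>
                    exact Or.inl (Or.inr ⟨u, pvCR_mono (by omega) hcr', hx⟩)
            · rintro (h | ⟨u, hu, hx⟩)
              · exact Or.inl h
              · exact Or.inr ⟨u, ((H2 u).mp hu).1, hx⟩
          have H1' : ∀ x, x ∈ (frontier.foldl (pvExpandB graph) ([], visited)).2 ↔ pvCR graph start (n+1) x := by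
            intro x
            rw [he2 x, hCRsucc x, H1 x]
          have H2' : ∀ x, x ∈ (frontier.foldl (pvExpandB graph) ([], visited)).1 ↔
              (pvCR graph start (n+1) x ∧ ∀ m < n + 1, ¬ pvCR graph start m x) := by
            intro x
            rw [he1 x, hCRsucc x, H1 x]
            constructor
            · rintro (h | ⟨hnv, h⟩)
              · simp at h
              · refine ⟨Or.inr h, ?_⟩
                intro m hm hcr'
                exact hnv (pvCR_mono (by omega) hcr')
            · rintro ⟨(h | h), hall⟩
              · exact absurd h (hall n (by omega))
              · exact Or.inr ⟨fun hv => hall n (by omega) hv, h⟩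
          have hrec := ih (n+1) (frontier.foldl (pvExpandB graph) ([], visited)).1
            (frontier.foldl (pvExpandB graph) ([], visited)).2 (by omega) H1' H2' H3'
          rw [show ((n : Int) + 1) = ((n + 1 : Nat) : Int) by push_cast; ring]
          exact hrec

theorem pvB_iff {graph : List (String × List (String × Int))} {start goal : String} {max_depth : Int} :
    iterative_deepening_dfs_alt graph start goal max_depth = true ↔
      ∃ k : Nat, (k : Int) ≤ max_depth ∧ pvWalk graph start k goal := by
  unfold iterative_deepening_dfs_alt
  by_cases hneg : max_depth < 0
  · rw [if_pos hneg]
    constructor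
    · intro h; exact absurd h (by simp)
    · rintro ⟨k, hk, _⟩; omega
  · rw [if_neg hneg]
    have H1 : ∀ x, x ∈ PySem.Set.add PySem.Set.empty start ↔ pvCR graph start 0 x := by
      intro x
      rw [PySem.Set.mem_add]
      simp [PySem.Set.empty, pvCR]
    have H2 : ∀ x, x ∈ [start] ↔ (pvCR graph start 0 x ∧ ∀ m < 0, ¬ pvCR graph start m x) := by
      intro x
      simp [pvCR]
    have H3 : ∀ m < 0, ¬ pvCR graph start m goal := by intro m hm; omega
    have h := pvBfs_correct (max_depth + 1 - ((0:Nat):Int)).toNat 0 [start]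
      (PySem.Set.add PySem.Set.empty start) (le_refl _) H1 H2 H3
    rw [show ((0:Nat) : Int) = (0 : Int) by norm_num] at h
    rw [h]
    constructor
    · rintro ⟨k, hk, hcr⟩
      obtain ⟨j, hj, hw⟩ := (pvCR_iff_walk k goal).mp hcr
      exact ⟨j, by omega, hw⟩
    · rintro ⟨k, hk, hw⟩
      exact ⟨k, hk, (pvCR_iff_walk k goal).mpr ⟨k, le_refl k, hw⟩⟩

-- ===== VERDICT (by name: the statement is the Claim_ definition above) =====
theorem iterative_deepening_dfs_spec : Claim_equal_iterative_deepening_dfs := by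
  intro graph start goal max_depth _
  unfold Spec_iterative_deepening_dfs
  have hA := @pvA_iff graph start goal max_depth
  have hB := @pvB_iff graph start goal max_depth
  cases hbA : iterative_deepening_dfs graph start goal max_depth <;>
    cases hbB : iterative_deepening_dfs_alt graph start goal max_depth
  · rfl
  · rw [hbA] at hA
    rw [hbB] at hB
    exact absurd (hB.mp rfl) (by intro h; have := hA.mpr h; simp at this)
  · rw [hbA] at hA
    rw [hbB] at hB
    exact absurd (hA.mp rfl) (by intro h; have := hB.mpr h; simp at this)
  · rfl
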